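-- pv_equiv track=rewrite | github.com/jiaqi-w/machine_learning | ml_algo/annotation_evaluation/annotation_evaluation.py | get_majority_vote
-- ===== SOURCE A (Python) =====
-- import collections
-- import operator
--
-- def get_majority_vote(row):
--
--     label_count_dict = collections.defaultdict(int)
--     for label in row:
--         if label == None:
--             continue
--         label_count_dict[label] += 1
--
--     if len(label_count_dict) == 0:
--         return None
--
--     sorted_label_count = sorted(label_count_dict.items(), key=operator.itemgetter(1), reverse=True)
--
--     if len(sorted_label_count) == 1:
--         return sorted_label_count[0][0]
--
--     if sorted_label_count[0][1] > sorted_label_count[1][1]: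
--         return sorted_label_count[0][0]
--     else:
--         # No one wins
--         return None
-- ===== SOURCE B (Python) =====
-- def get_majority_vote(row):
--     counts = {}
--     for label in row:
--         if label is None:
--             continue
--         counts[label] = counts.get(label, 0) + 1
--     best_count = 0
--     best = None
--     unique = False
--     for label, c in counts.items():
--         if c > best_count:
--             best_count, best, unique = c, label, True
--         elif c == best_count:
--             unique = False
--     return best if unique else None
-- ===== Notes on version B (the rewrite author's own statement) =====
-- stated objective: alternative
-- what changed: replaces the sort of the (label,count) items and inspection of the top two entries by a single linear scan of the counts that tracks the running maximum and whether it is uniquely achieved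
import Mathlib
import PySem

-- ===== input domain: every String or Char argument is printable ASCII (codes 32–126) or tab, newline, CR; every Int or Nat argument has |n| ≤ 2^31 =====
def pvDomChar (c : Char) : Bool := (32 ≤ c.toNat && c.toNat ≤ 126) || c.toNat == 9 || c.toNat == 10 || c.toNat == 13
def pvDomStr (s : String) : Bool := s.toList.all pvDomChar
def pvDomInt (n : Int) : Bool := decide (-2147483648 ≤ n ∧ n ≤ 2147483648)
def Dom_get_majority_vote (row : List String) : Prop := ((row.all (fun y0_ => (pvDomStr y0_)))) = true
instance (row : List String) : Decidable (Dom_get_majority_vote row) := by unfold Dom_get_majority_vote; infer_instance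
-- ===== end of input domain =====

-- B replaces A's sort-the-counts-and-look-at-the-top-two by a single linear scan of the
-- counts tracking the running maximum and whether it is uniquely achieved (objective: alternative).

-- ===== PORT A =====
-- the Python's 'if label == None: continue' is unrepresentable for row : List String and skipped
def get_majority_vote (row : List String) : Option String :=
  let label_count_dict :=
    row.foldl (fun d label => d.modify label 0 (· + 1)) (PySem.Dict.empty : PySem.Dict String Int)
  if label_count_dict.size = 0 then none
  else
    match PySem.List.sorted label_count_dict.items (fun p => p.2) true with
    | [] => none
    | [p] => some p.1
    | p :: q :: _ => if q.2 < p.2 then some p.1 else none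

-- ===== PORT B =====
def get_majority_vote_alt (row : List String) : Option String :=
  let counts := row.foldl (fun d label => d.insert label (d.getD label 0 + 1)) (PySem.Dict.empty : PySem.Dict String Int)
  let st := counts.items.foldl
      (fun (st : Int × Option String × Bool) p =>
        if st.1 < p.2 then (p.2, some p.1, true)
        else if p.2 = st.1 then (st.1, st.2.1, false)
        else st)
      (0, none, false)
  if st.2.2 then st.2.1 else none

-- ===== PRECONDITION & SPEC =====
def Spec_get_majority_vote (row : List String) (out : Option String) : Prop := out = get_majority_vote_alt row
instance (row : List String) (out : Option String) : Decidable (Spec_get_majority_vote row out) := by unfold Spec_get_majority_vote; infer_instance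

-- ===== CLAIM (what is proved, stated in full; the proofs are below) =====
def Claim_equal_get_majority_vote : Prop := ∀ (row : List String), Dom_get_majority_vote row → Spec_get_majority_vote row (get_majority_vote row)

-- ===== LEMMAS AND PROOFS =====

-- the maximum count in an items list
def pvMax (L : List (String × Int)) : Int := L.foldl (fun m p => max m p.2) 0

def pvStep (st : Int × Option String × Bool) (p : String × Int) : Int × Option String × Bool :=
  if st.1 < p.2 then (p.2, some p.1, true)
  else if p.2 = st.1 then (st.1, st.2.1, false)
  else st

lemma pvMax_append (L : List (String × Int)) (p : String × Int) :
    pvMax (L ++ [p]) = max (pvMax L) p.2 := by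
  simp [pvMax, List.foldl_append]

lemma le_pvMax {L : List (String × Int)} {q : String × Int} (hq : q ∈ L) : q.2 ≤ pvMax L := by
  induction L using List.reverseRecOn with
  | nil => cases hq
  | append_singleton L p ih =>
      rw [pvMax_append]
      rcases List.mem_append.1 hq with h | h
      · exact le_max_of_le_left (ih h)
      · simp at h; subst h; exact le_max_right _ _
lemma pvMax_attained {L : List (String × Int)} (hpos : ∀ p ∈ L, 0 < p.2) (hne : L ≠ []) :
    ∃ q ∈ L, q.2 = pvMax L := by
  induction L using List.reverseRecOn with
  | nil => exact absurd rfl hne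
  | append_singleton L p ih =>
      rw [pvMax_append]
      rcases eq_or_ne L [] with h | h
      · subst h
        refine ⟨p, by simp, ?_⟩
        have := hpos p (by simp)
        simp [pvMax]; omega
      · obtain ⟨q, hq, hqm⟩ := ih (fun r hr => hpos r (List.mem_append_left _ hr)) h
        rcases le_or_gt p.2 (pvMax L) with hle | hlt
        · exact ⟨q, List.mem_append_left _ hq, by rw [hqm]; omega⟩
        · exact ⟨p, List.mem_append_right _ (by simp), by omega⟩

-- characterization of B's scan
lemma pvFold_char (L : List (String × Int)) (hpos : ∀ p ∈ L, 0 < p.2) :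
    L.foldl pvStep (0, none, false)
      = (pvMax L, (L.find? (fun p => p.2 == pvMax L)).map (·.1),
         decide (L.countP (fun p => p.2 == pvMax L) = 1)) := by
  induction L using List.reverseRecOn with
  | nil => simp [pvMax]
  | append_singleton L p ih =>
      have hposL : ∀ q ∈ L, 0 < q.2 := fun r hr => hpos r (List.mem_append_left _ hr)
      have hp : 0 < p.2 := hpos p (List.mem_append_right _ (by simp))
      rw [List.foldl_append, ih hposL, pvMax_append]
      rcases lt_trichotomy (pvMax L) p.2 with hlt | heq | hgt
      · -- new strict maximum
        have hmax : max (pvMax L) p.2 = p.2 := by omega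
        have hnone : ∀ q ∈ L, ¬ (q.2 == p.2) = true := by
          intro q hq hq2
          have := le_pvMax hq
          simp at hq2; omega
        have hcount : L.countP (fun q => q.2 == p.2) = 0 :=
          List.countP_eq_zero.2 hnone
        have hfind : L.find? (fun q => q.2 == p.2) = none :=
          List.find?_eq_none.2 hnone
        simp [List.foldl_cons, pvStep, hlt, hmax, List.find?_append, hfind,
          List.countP_append, hcount]
      · -- equals the old maximum: L is nonempty, max already attained
        have hLne : L ≠ [] := by
          intro h; subst h; simp [pvMax] at heq; omega
        obtain ⟨q, hq, hqm⟩ := pvMax_attained hposL hLne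
        have hcount1 : 0 < L.countP (fun r => r.2 == pvMax L) :=
          List.countP_pos_iff.2 ⟨q, hq, by simp [hqm]⟩
        have hmax : max (pvMax L) p.2 = pvMax L := by omega
        have h1 : ¬ pvMax L < p.2 := by omega
        have h2 : p.2 = pvMax L := heq.symm
        rcases h : L.find? (fun r => r.2 == pvMax L) with _ | r
        · exact absurd (List.find?_eq_none.1 h q hq (by simp [hqm])) (by simp)
        · simp only [List.foldl_cons, List.foldl_nil, pvStep, if_neg h1, if_pos h2, h, hmax]
          refine Prod.ext rfl (Prod.ext ?_ ?_)
          · simp [List.find?_append, h]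
          · have h4 : (L ++ [p]).countP (fun r => r.2 == pvMax L) =
                L.countP (fun r => r.2 == pvMax L) + 1 := by
              rw [List.countP_append]; simp [h2]
            have h5 : L.countP (fun r => r.2 == pvMax L) + 1 ≠ 1 := by omega
            rw [h4]; exact (decide_eq_false h5).symm
      · -- below the old maximum: state unchanged
        have hmax : max (pvMax L) p.2 = pvMax L := by omega
        have h1 : ¬ pvMax L < p.2 := by omega
        have h2 : ¬ p.2 = pvMax L := by omega
        simp only [List.foldl_cons, List.foldl_nil, pvStep, if_neg h1, if_neg h2, hmax]
        refine Prod.ext rfl (Prod.ext ?_ ?_)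
        · rcases h : L.find? (fun r => r.2 == pvMax L) with _ | r <;>
            simp [List.find?_append, h, h2]
        · rw [List.countP_append]; simp [h2]

-- a list with exactly one element satisfying a predicate: any two members satisfying it coincide
lemma pv_unique_of_countP_one {L : List (String × Int)} {pr : String × Int → Bool}
    (h : L.countP pr = 1) {a b : String × Int}
    (ha : a ∈ L) (hpa : pr a = true) (hb : b ∈ L) (hpb : pr b = true) : a = b := by
  rw [List.countP_eq_length_filter] at h
  rcases hf : L.filter pr with _ | ⟨x, t⟩
  · have := List.mem_filter.2 ⟨ha, hpa⟩; rw [hf] at this; cases this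
  · rw [hf] at h; simp at h
    have h1 := List.mem_filter.2 ⟨ha, hpa⟩
    have h2 := List.mem_filter.2 ⟨hb, hpb⟩
    rw [hf, h] at h1 h2
    simp at h1 h2; rw [h1, h2]

-- both dicts are (definitionally) the Counter of row
lemma pv_dicts (row : List String) :
    row.foldl (fun d label => d.modify label 0 (· + 1)) (PySem.Dict.empty : PySem.Dict String Int)
      = PySem.Dict.counter row := rfl

-- ===== VERDICT (by name: the statement is the Claim_ definition above) =====
theorem get_majority_vote_spec : Claim_equal_get_majority_vote := by
  intro row _
  unfold Spec_get_majority_vote get_majority_vote get_majority_vote_alt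
  simp only [pv_dicts, PySem.Dict.foldl_insert_getD_add_one_eq_counter]
  set L := (PySem.Dict.counter row).items with hL
  have hpos : ∀ p ∈ L, 0 < p.2 := by
    intro p hp
    rw [hL, PySem.Dict.items_counter] at hp
    obtain ⟨k, hk, rfl⟩ := List.mem_map.1 hp
    have : k ∈ row := (PySem.Set.mem_ofList _ _).1 hk
    have := List.count_pos_iff.2 this
    simpa using this
  rw [show (L.foldl (fun st p => if st.1 < p.2 then (p.2, some p.1, true)
      else if p.2 = st.1 then (st.1, st.2.1, false) else st) (0, none, false))
      = L.foldl pvStep (0, none, false) from rfl, pvFold_char L hpos]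
  have hperm : (PySem.List.sorted L (fun p => p.2) true).Perm L := PySem.List.sorted_perm _ _ _
  by_cases hsz : (PySem.Dict.counter row).size = 0
  · -- empty dict: L = [], both sides none
    have hLnil : L = [] := List.length_eq_zero_iff.1 hsz
    simp [hsz, hLnil, pvMax]
  · simp only [hsz, if_false]
    rcases hS : PySem.List.sorted L (fun p => p.2) true with _ | ⟨p, rest⟩
    · -- sorted empty while dict nonempty: impossible
      rw [hS] at hperm
      have hnil : L = [] := hperm.symm.eq_nil
      exact absurd (show (PySem.Dict.counter row).size = 0 from by
        show L.length = 0
        rw [hnil]; rfl) hsz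
    · rw [hS] at hperm
      have hpmem : p ∈ L := hperm.mem_iff.1 (by simp)
      have hple : ∀ y ∈ L, y.2 ≤ p.2 :=
        PySem.List.key_head_sorted_rev_ge L (fun r => r.2) hS
      have hpm : p.2 = pvMax L :=
        le_antisymm (le_pvMax hpmem) <| by
          obtain ⟨q, hq, hqm⟩ := pvMax_attained hpos (by
            intro h; rw [h] at hpmem; cases hpmem)
          rw [← hqm]; exact hple q hq
      rcases rest with _ | ⟨q, t⟩
      · -- exactly one label
        have hLeq : L = [p] := List.perm_singleton.mp hperm.symm
        have hm1 : pvMax [p] = p.2 := by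
          have := hpos p hpmem; simp [pvMax]; omega
        have hfind : List.find? (fun r => r.2 == pvMax L) L = some p := by
          rw [hLeq]; simp [hm1]
        have hcnt : L.countP (fun r => r.2 == pvMax L) = 1 := by
          rw [hLeq]; simp [hm1]
        simp [hfind, hcnt]
      · -- at least two labels
        have hpw := PySem.List.sorted_pairwise_rev (xs := L) (key := fun p => p.2)
        rw [hS] at hpw
        have hqle : q.2 ≤ p.2 := (List.pairwise_cons.1 hpw).1 q (by simp)
        have hqt : ∀ r ∈ t, r.2 ≤ q.2 :=
          fun r hr => (List.pairwise_cons.1 (List.pairwise_cons.1 hpw).2).1 r hr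
        by_cases hgt : q.2 < p.2
        · -- strict winner: count of maximal labels is 1, B finds p
          have hcnt : L.countP (fun r => r.2 == pvMax L) = 1 := by
            rw [← hperm.countP_eq]
            have h0 : (q :: t).countP (fun r => r.2 == pvMax L) = 0 :=
              List.countP_eq_zero.2 (by
                intro r hr
                simp only [beq_iff_eq]
                rcases List.mem_cons.1 hr with rfl | hrt
                · omega
                · have := hqt r hrt; omega)
            simp [hpm, h0]
          rcases hfind : L.find? (fun r => r.2 == pvMax L) with _ | r
          · exact absurd (List.find?_eq_none.1 hfind p hpmem (by simp [hpm])) (by simp)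
          · have hrmem : r ∈ L := List.mem_of_find?_eq_some hfind
            have hrpred := List.find?_some hfind
            have hrp : r = p :=
              pv_unique_of_countP_one hcnt hrmem hrpred hpmem (by simp [hpm])
            simp [hgt, hcnt]
            exact ⟨p.2, by rw [hfind, hrp]⟩
        · -- tie at the top: both return none
          have hcnt : L.countP (fun r => r.2 == pvMax L) ≠ 1 := by
            rw [← hperm.countP_eq]
            have hq2 : q.2 = pvMax L := by rw [← hpm]; omega
            simp [hpm, hq2]
          simp [hgt, hcnt]
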